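-- pv_equiv track=rewrite | github.com/Arborae/docker2homeassistant | d2ha/services/utils.py | build_stable_id
-- ===== SOURCE A (Python) =====
-- from typing import Any, Dict
--
-- def build_stable_id(container_info: Dict[str, Any]) -> str:
--     """Create a stable ID for Home Assistant based on stack + container name.
--
--     Avoids Docker IDs so the unique_id stays stable when containers are recreated.
--
--     Args:
--         container_info: Dictionary containing 'stack' and 'name' keys.
--
--     Returns:
--         Stable identifier string suitable for Home Assistant entity IDs.
--     """
--
--     stack = container_info.get("stack") or "no_stack"
--     name = container_info.get("name") or "container"
--
--     base = f"{stack}__{name}"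
--
--     slug = "".join(ch.lower() if ch.isalnum() else "_" for ch in base)
--
--     while "__" in slug:
--         slug = slug.replace("__", "_")
--     slug = slug.strip("_")
--     return slug
-- ===== SOURCE B (Python) =====
-- from typing import Any, Dict
--
-- def build_stable_id(container_info: Dict[str, Any]) -> str:
--     """Create a stable ID for Home Assistant based on stack + container name.
--
--     Single left-to-right pass: collect lowercased alphanumeric runs of
--     "{stack}__{name}" as words and join them with single underscores, which
--     yields the collapsed, trimmed slug directly.
--     """
--     stack = container_info.get("stack") or "no_stack"
--     name = container_info.get("name") or "container"
--
--     base = f"{stack}__{name}"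
--
--     words = []
--     buf = []
--     for ch in base:
--         if ch.isalnum():
--             buf.append(ch.lower())
--         elif buf:
--             words.append("".join(buf))
--             buf = []
--     if buf:
--         words.append("".join(buf))
--     return "_".join(words)
-- ===== Notes on version B (the rewrite author's own statement) =====
-- stated objective: simpler
-- what changed: Replaces the map-to-underscores string, the fixpoint 'while "__" in slug: replace' collapse loop and the final strip('_') with a single left-to-right pass that collects lowercased alphanumeric runs as words and joins them with single underscores.
import Mathlib
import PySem

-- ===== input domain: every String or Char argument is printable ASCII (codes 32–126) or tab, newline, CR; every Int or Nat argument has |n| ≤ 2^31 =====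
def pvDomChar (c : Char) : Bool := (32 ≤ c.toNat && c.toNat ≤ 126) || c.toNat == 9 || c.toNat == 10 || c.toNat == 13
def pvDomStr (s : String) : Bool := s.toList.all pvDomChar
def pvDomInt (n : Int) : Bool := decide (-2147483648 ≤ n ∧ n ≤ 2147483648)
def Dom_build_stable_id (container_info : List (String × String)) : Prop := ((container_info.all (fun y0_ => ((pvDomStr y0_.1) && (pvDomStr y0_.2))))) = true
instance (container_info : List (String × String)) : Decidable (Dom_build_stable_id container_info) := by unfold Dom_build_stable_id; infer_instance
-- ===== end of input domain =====

-- B replaces A's fixpoint "__"-collapse loop and strip("_") by a single pass that joins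
-- lowercased alphanumeric runs with single underscores (objective: simpler).


-- ===== PORT A =====
-- `container_info.get(k) or dflt` (value falsy iff missing or empty string); shared by both ports
def pvGetOr (container_info : List (String × String)) (k dflt : String) : String :=
  match PySem.Dict.get? ⟨container_info⟩ k with
  | some s => if s = "" then dflt else s
  | none => dflt

-- `ch.lower() if ch.isalnum() else "_"`
def pvF (ch : Char) : Char :=
  if PySem.Chars.isalnum ch then PySem.Chars.lowerChar ch else '_'

-- proof-side model of one `slug.replace("__", "_")` pass (left-to-right, non-overlapping),
-- used to prove termination of A's while loop
def pvRep : List Char → List Char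
  | [] => []
  | [c] => [c]
  | c :: d :: r => if c = '_' ∧ d = '_' then '_' :: pvRep r else c :: pvRep (d :: r)

-- proof-side model of `"__" in slug`
def pvHasDD : List Char → Bool
  | [] => false
  | [_] => false
  | c :: d :: r => (decide (c = '_' ∧ d = '_')) || pvHasDD (d :: r)

theorem pvReplace_go_eq (fuel : Nat) (l acc : List Char) (h : l.length ≤ fuel) :
    PySem.Chars.replace.go ['_', '_'] ['_'] fuel l acc = acc.reverse ++ pvRep l := by
  induction fuel generalizing l acc with
  | zero =>
    have : l = [] := List.eq_nil_of_length_eq_zero (Nat.le_zero.mp h)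
    subst this; simp [PySem.Chars.replace.go, pvRep]
  | succ n ih =>
    match l with
    | [] => simp [PySem.Chars.replace.go, pvRep]
    | [c] =>
      have hpre : List.isPrefixOf ['_', '_'] [c] = false := by
        simp [List.isPrefixOf]
      simp only [PySem.Chars.replace.go, hpre, Bool.false_eq_true, if_false]
      rw [ih [] (c :: acc) (by simp)]
      simp [pvRep]
    | c :: d :: r =>
      by_cases hdd : c = '_' ∧ d = '_'
      · obtain ⟨hc, hd⟩ := hdd
        subst hc; subst hd
        have hpre : List.isPrefixOf ['_', '_'] ('_' :: '_' :: r) = true := by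
          simp [List.isPrefixOf]
        simp only [PySem.Chars.replace.go, hpre, if_true]
        have hr : r.length ≤ n := by simp at h; omega
        rw [show List.drop (['_', '_'] : List Char).length ('_' :: '_' :: r) = r from rfl]
        rw [ih r (['_'].reverse ++ acc) hr]
        simp [pvRep]
      · have hpre : List.isPrefixOf ['_', '_'] (c :: d :: r) = false := by
          simp only [List.isPrefixOf, Bool.and_true]
          by_cases hc : '_' = c
          · by_cases hd : '_' = d
            · exact absurd ⟨hc.symm, hd.symm⟩ hdd
            · simp [hd]
          · simp [hc]
        simp only [PySem.Chars.replace.go, hpre, Bool.false_eq_true, if_false]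
        rw [ih (d :: r) (c :: acc) (by simp at h ⊢; omega)]
        have hdd' : ¬(c = '_' ∧ d = '_') := hdd
        simp [pvRep, hdd']
theorem pvReplace_eq (l : List Char) :
    PySem.Chars.replace l ['_', '_'] ['_'] = pvRep l := by
  show PySem.Chars.replace.go ['_', '_'] ['_'] l.length l [] = pvRep l
  simpa using pvReplace_go_eq l.length l [] le_rfl

theorem pvHasDD_iff_infix (l : List Char) : pvHasDD l = true ↔ ['_', '_'] <:+: l := by
  match l with
  | [] => simp [pvHasDD]
  | [c] =>
    simp only [pvHasDD]
    constructor
    · intro h; cases h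
    · intro h
      have := h.length_le
      simp at this
  | c :: d :: r =>
    simp only [pvHasDD, Bool.or_eq_true, decide_eq_true_eq]
    constructor
    · rintro (⟨h1, h2⟩ | h)
      · subst h1; subst h2; exact ⟨[], r, rfl⟩
      · exact List.infix_cons ((pvHasDD_iff_infix (d :: r)).mp h)
    · rintro ⟨s, t, hst⟩
      match s with
      | [] =>
        simp at hst
        exact Or.inl ⟨hst.1.symm, hst.2.1.symm⟩
      | e :: s' =>
        right
        rw [pvHasDD_iff_infix (d :: r)]
        simp only [List.cons_append] at hst
        exact ⟨s', t, by injection hst⟩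

theorem pvRep_length_le (l : List Char) : (pvRep l).length ≤ l.length := by
  match l with
  | [] => simp [pvRep]
  | [c] => simp [pvRep]
  | c :: d :: r =>
    simp only [pvRep]
    split_ifs with h
    · have := pvRep_length_le r; simp; omega
    · have := pvRep_length_le (d :: r); simp at this ⊢; omega

theorem pvRep_length_lt (l : List Char) (h : pvHasDD l = true) :
    (pvRep l).length < l.length := by
  match l with
  | [] => simp [pvHasDD] at h
  | [c] => simp [pvHasDD] at h
  | c :: d :: r =>
    simp only [pvHasDD, Bool.or_eq_true, decide_eq_true_eq] at h
    simp only [pvRep]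
    split_ifs with h1
    · have := pvRep_length_le r; simp; omega
    · have := pvRep_length_lt (d :: r) (by tauto)
      simp at this ⊢; omega

theorem pv_replace_decreases (l : List Char) (h : PySem.Chars.isIn ['_', '_'] l = true) :
    (PySem.Chars.replace l ['_', '_'] ['_']).length < l.length := by
  rw [pvReplace_eq]
  exact pvRep_length_lt l ((pvHasDD_iff_infix l).mpr ((PySem.Chars.isIn_iff_infix _ _).mp h))

-- `while "__" in slug: slug = slug.replace("__", "_")`
def pvAloop (l : List Char) : List Char :=
  if h : PySem.Chars.isIn ['_', '_'] l = true then
    pvAloop (PySem.Chars.replace l ['_', '_'] ['_'])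
  else l
termination_by l.length
decreasing_by exact pv_replace_decreases l h

def build_stable_id (container_info : List (String × String)) : String :=
  let stack := pvGetOr container_info "stack" "no_stack"
  let name := pvGetOr container_info "name" "container"
  let base := stack ++ "__" ++ name
  let slug := base.toList.map pvF        -- "".join(ch.lower() if ch.isalnum() else "_" for ch in base)
  let slug := pvAloop slug
  String.mk (PySem.Chars.stripChars slug ['_'])   -- slug.strip("_")

-- ===== PORT B =====
-- loop body of Source B: extend the current word on an alnum char, else flush a non-empty buffer
def pvStep (acc : List (List Char) × List Char) (ch : Char) : List (List Char) × List Char :=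
  if PySem.Chars.isalnum ch then (acc.1, acc.2 ++ [PySem.Chars.lowerChar ch])
  else if acc.2 = [] then acc
  else (acc.1 ++ [acc.2], [])

def build_stable_id_alt (container_info : List (String × String)) : String :=
  let stack := pvGetOr container_info "stack" "no_stack"
  let name := pvGetOr container_info "name" "container"
  let base := stack ++ "__" ++ name
  let acc := base.toList.foldl pvStep ([], [])
  let words := if acc.2 = [] then acc.1 else acc.1 ++ [acc.2]   -- trailing flush
  String.mk (PySem.Chars.join ['_'] words)                      -- "_".join(words)

-- ===== PRECONDITION & SPEC =====
def Spec_build_stable_id (container_info : List (String × String)) (out : String) : Prop := out = build_stable_id_alt container_info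
instance (container_info : List (String × String)) (out : String) : Decidable (Spec_build_stable_id container_info out) := by unfold Spec_build_stable_id; infer_instance

-- ===== CLAIM (what is proved, stated in full; the proofs are below) =====
def Claim_equal_build_stable_id : Prop := ∀ (container_info : List (String × String)), Dom_build_stable_id container_info → Spec_build_stable_id container_info (build_stable_id container_info)

-- ===== LEMMAS AND PROOFS =====

-- canonical collapsed form: drop each '_' that is immediately followed by another '_'
def pvCollapse : List Char → List Char
  | [] => []
  | [c] => [c]
  | c :: d :: r => if c = '_' ∧ d = '_' then pvCollapse (d :: r) else c :: pvCollapse (d :: r)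

def pvLstrip (l : List Char) : List Char := l.dropWhile (fun c => c == '_')
def pvRstrip (l : List Char) : List Char := (l.reverse.dropWhile (fun c => c == '_')).reverse

-- word list of the mapped slug: maximal runs of non-'_' characters
def pvWB (buf : List Char) : List Char → List (List Char)
  | [] => if buf = [] then [] else [buf]
  | c :: r => if c = '_' then (if buf = [] then pvWB [] r else buf :: pvWB [] r)
              else pvWB (buf ++ [c]) r

-- word list of the raw base string: B's buffer recursion
def pvWB2 (buf : List Char) : List Char → List (List Char)
  | [] => if buf = [] then [] else [buf]
  | c :: r => if PySem.Chars.isalnum c then pvWB2 (buf ++ [PySem.Chars.lowerChar c]) r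
              else if buf = [] then pvWB2 [] r else buf :: pvWB2 [] r

def pvJoinW : List (List Char) → List Char
  | [] => []
  | w :: ws => w ++ (if ws = [] then [] else '_' :: pvJoinW ws)

-- value of rstrip(collapse r) as a function of the word list
def pvTw (r : List Char) : List Char :=
  if pvWB [] r = [] then []
  else if r.head? = some '_' then '_' :: pvJoinW (pvWB [] r) else pvJoinW (pvWB [] r)

theorem pvLower_ne_underscore (c : Char) (h : PySem.Chars.isalnum c = true) :
    PySem.Chars.lowerChar c ≠ '_' := by
  simp only [PySem.Chars.isalnum, PySem.Chars.isalpha, PySem.Chars.isupper, PySem.Chars.islower,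
    PySem.Chars.isdigit, Bool.or_eq_true, Bool.and_eq_true, decide_eq_true_eq] at h
  unfold PySem.Chars.lowerChar PySem.Chars.isupper
  intro heq
  have h95 : Char.toNat '_' = 95 := rfl
  split_ifs at heq with hu
  · simp only [Bool.and_eq_true, decide_eq_true_eq] at hu
    have h1 : 65 ≤ c.toNat := hu.1
    have h2 : c.toNat ≤ 90 := hu.2
    have hval : (c.toNat + 32).isValidChar := Or.inl (by omega)
    have ht : (Char.ofNat (c.toNat + 32)).toNat = c.toNat + 32 := by
      rw [Char.toNat_ofNat, if_pos hval]
    have := congrArg Char.toNat heq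
    rw [ht, h95] at this
    omega
  · have := congrArg Char.toNat heq
    rw [h95] at this
    simp only [Bool.and_eq_true, decide_eq_true_eq] at hu
    rcases h with (hup | hlo) | hdig
    · exact hu ⟨hup.1, hup.2⟩
    · have h1 : 97 ≤ c.toNat := hlo.1
      have h2 : c.toNat ≤ 122 := hlo.2
      omega
    · have h1 : 48 ≤ c.toNat := hdig.1
      have h2 : c.toNat ≤ 57 := hdig.2
      omega

theorem pvRep_head? (l : List Char) : (pvRep l).head? = l.head? := by
  match l with
  | [] => rfl
  | [c] => rfl
  | c :: d :: r =>
    simp only [pvRep]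
    split_ifs with h
    · simp [h.1]
    · rfl

theorem pvCollapse_rep (l : List Char) : pvCollapse (pvRep l) = pvCollapse l := by
  match l with
  | [] => rfl
  | [c] => rfl
  | c :: d :: r =>
    by_cases hdd : c = '_' ∧ d = '_'
    · obtain ⟨hc, hd⟩ := hdd
      subst hc; subst hd
      rw [show pvRep ('_' :: '_' :: r) = '_' :: pvRep r from by simp [pvRep]]
      cases r with
      | nil => simp [pvRep, pvCollapse]
      | cons e r' =>
        have hh := pvRep_head? (e :: r')
        cases hrep : pvRep (e :: r') with
        | nil => rw [hrep] at hh; simp at hh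
        | cons e' x =>
          rw [hrep] at hh
          simp only [List.head?_cons, Option.some.injEq] at hh
          have ih := pvCollapse_rep (e :: r')
          rw [hrep] at ih
          rw [hh] at ih ⊢
          by_cases he : e = '_'
          · subst he; simp [pvCollapse, ih]
          · simp [pvCollapse, he, ih]
    · have hne : pvRep (c :: d :: r) = c :: pvRep (d :: r) := by simp [pvRep, hdd]
      rw [hne]
      have hh := pvRep_head? (d :: r)
      cases hrep : pvRep (d :: r) with
      | nil => rw [hrep] at hh; simp at hh
      | cons d' x =>
        rw [hrep] at hh
        simp only [List.head?_cons, Option.some.injEq] at hh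
        have ih := pvCollapse_rep (d :: r)
        rw [hrep] at ih
        rw [hh] at ih ⊢
        simp only [pvCollapse, if_neg hdd, ih]

theorem pvCollapse_of_not_hasDD (l : List Char) (h : pvHasDD l = false) : pvCollapse l = l := by
  match l with
  | [] => rfl
  | [c] => rfl
  | c :: d :: r =>
    simp only [pvHasDD, Bool.or_eq_false_iff, decide_eq_false_iff_not] at h
    simp only [pvCollapse, if_neg h.1]
    rw [pvCollapse_of_not_hasDD (d :: r) h.2]

theorem pvAloop_eq_collapse (l : List Char) : pvAloop l = pvCollapse l := by
  rw [pvAloop]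
  split_ifs with h
  · rw [pvAloop_eq_collapse (PySem.Chars.replace l ['_', '_'] ['_'])]
    rw [pvReplace_eq, pvCollapse_rep]
  · have hdd : pvHasDD l = false := by
      cases hdd : pvHasDD l
      · rfl
      · exact absurd ((PySem.Chars.isIn_iff_infix _ _).mpr ((pvHasDD_iff_infix l).mp hdd)) h
    exact (pvCollapse_of_not_hasDD l hdd).symm
termination_by l.length
decreasing_by exact pv_replace_decreases l h

theorem pvWB_ne_nil (buf : List Char) (l : List Char) (h : buf ≠ []) : pvWB buf l ≠ [] := by
  match l with
  | [] => simp [pvWB, h]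
  | c :: r =>
    by_cases hc : c = '_'
    · simp [pvWB, hc, h]
    · simp only [pvWB, if_neg hc]
      exact pvWB_ne_nil (buf ++ [c]) r (by simp)

theorem pvJoinW_WB (l : List Char) (buf : List Char) (h : buf ≠ []) :
    pvJoinW (pvWB buf l) = buf ++ pvTw l := by
  match l with
  | [] => simp [pvWB, h, pvJoinW, pvTw]
  | c :: r =>
    by_cases hc : c = '_'
    · subst hc
      have hwb : pvWB buf ('_' :: r) = buf :: pvWB [] r := by simp [pvWB, h]
      rw [hwb]
      simp only [pvJoinW]
      have hif : (if pvWB [] r = [] then [] else '_' :: pvJoinW (pvWB [] r)) = pvTw ('_' :: r) := by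
        simp [pvTw, pvWB]
      rw [hif]
    · have hstep : pvWB buf (c :: r) = pvWB (buf ++ [c]) r := by simp [pvWB, hc]
      rw [hstep, pvJoinW_WB r (buf ++ [c]) (by simp)]
      have hwb : pvWB [] (c :: r) = pvWB [c] r := by simp [pvWB, hc]
      have hne : pvWB [c] r ≠ [] := pvWB_ne_nil [c] r (by simp)
      have htw : pvTw (c :: r) = [c] ++ pvTw r := by
        simp [pvTw, hwb, hne, hc, pvJoinW_WB r [c] (by simp)]
      rw [htw, List.append_assoc]

theorem pvRstrip_cons (a : Char) (x : List Char) :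
    pvRstrip (a :: x) = if pvRstrip x = [] then (if a = '_' then [] else [a]) else a :: pvRstrip x := by
  unfold pvRstrip
  rw [List.reverse_cons, List.dropWhile_append]
  by_cases hx : x.reverse.dropWhile (fun c => c == '_') = []
  · rw [hx]
    by_cases ha : a = '_'
    · simp [List.dropWhile, ha]
    · have hbeq : (a == '_') = false := by simpa using ha
      simp [List.dropWhile, hbeq, ha]
  · rw [if_neg (by simp [List.isEmpty_iff, hx])]
    rw [if_neg (by simp [hx])]
    simp

theorem pvRstrip_collapse (r : List Char) : pvRstrip (pvCollapse r) = pvTw r := by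
  match r with
  | [] => rfl
  | [c] =>
    by_cases hc : c = '_'
    · subst hc
      simp [pvCollapse, pvRstrip, pvTw, pvWB, List.dropWhile]
    · simp [pvCollapse, pvRstrip, pvTw, pvWB, pvJoinW, hc]
  | c :: d :: r' =>
    by_cases hdd : c = '_' ∧ d = '_'
    · obtain ⟨hc, hd⟩ := hdd
      subst hc; subst hd
      rw [show pvCollapse ('_' :: '_' :: r') = pvCollapse ('_' :: r') from by simp [pvCollapse]]
      rw [pvRstrip_collapse ('_' :: r')]
      simp [pvTw, pvWB]
    · have hcol : pvCollapse (c :: d :: r') = c :: pvCollapse (d :: r') := by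
        simp [pvCollapse, hdd]
      rw [hcol, pvRstrip_cons, pvRstrip_collapse (d :: r')]
      by_cases hc : c = '_'
      · subst hc
        have hd : d ≠ '_' := fun h => hdd ⟨rfl, h⟩
        have hwb : pvWB [] (d :: r') = pvWB [d] r' := by simp [pvWB, hd]
        have hne : pvWB [] (d :: r') ≠ [] := by
          rw [hwb]; exact pvWB_ne_nil [d] r' (by simp)
        have htw : pvTw (d :: r') = pvJoinW (pvWB [] (d :: r')) := by
          simp [pvTw, hne, hd]
        have hjne : pvJoinW (pvWB [] (d :: r')) ≠ [] := by
          rw [hwb, pvJoinW_WB r' [d] (by simp)]; simp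
        rw [htw, if_neg hjne]
        have hne2 : pvWB [d] r' ≠ [] := pvWB_ne_nil [d] r' (by simp)
        simp [pvTw, pvWB, hd, hne2]
      · have hwb : pvWB [] (c :: d :: r') = pvWB [c] (d :: r') := by simp [pvWB, hc]
        have hne : pvWB [c] (d :: r') ≠ [] := pvWB_ne_nil [c] (d :: r') (by simp)
        have hrhs : pvTw (c :: d :: r') = c :: pvTw (d :: r') := by
          simp [pvTw, hwb, hne, hc, pvJoinW_WB (d :: r') [c] (by simp)]
        rw [hrhs]
        by_cases ht : pvTw (d :: r') = [] <;> simp [ht, hc]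

theorem pvLstrip_collapse (r : List Char) : pvLstrip (pvCollapse r) = pvCollapse (pvLstrip r) := by
  match r with
  | [] => rfl
  | [c] =>
    by_cases hc : c = '_'
    · simp [pvCollapse, pvLstrip, List.dropWhile, hc]
    · have hbeq : (c == '_') = false := by simpa using hc
      simp [pvCollapse, pvLstrip, List.dropWhile, hbeq]
  | c :: d :: r' =>
    by_cases hdd : c = '_' ∧ d = '_'
    · obtain ⟨hc, hd⟩ := hdd
      subst hc; subst hd
      rw [show pvCollapse ('_' :: '_' :: r') = pvCollapse ('_' :: r') from by simp [pvCollapse]]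
      rw [pvLstrip_collapse ('_' :: r')]
      have h4 : pvLstrip ('_' :: '_' :: r') = pvLstrip ('_' :: r') := by
        simp [pvLstrip, List.dropWhile]
      rw [h4]
    · have h1 : pvCollapse (c :: d :: r') = c :: pvCollapse (d :: r') := by
        simp [pvCollapse, hdd]
      rw [h1]
      by_cases hc : c = '_'
      · subst hc
        have h2 : pvLstrip ('_' :: pvCollapse (d :: r')) = pvLstrip (pvCollapse (d :: r')) := by
          simp [pvLstrip, List.dropWhile]
        have h3 : pvLstrip ('_' :: d :: r') = pvLstrip (d :: r') := by
          simp [pvLstrip, List.dropWhile]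
        rw [h2, pvLstrip_collapse (d :: r'), h3]
      · have hbeq : (c == '_') = false := by simpa using hc
        have h2 : pvLstrip (c :: pvCollapse (d :: r')) = c :: pvCollapse (d :: r') := by
          simp [pvLstrip, hbeq]
        have h3 : pvLstrip (c :: d :: r') = c :: d :: r' := by
          simp [pvLstrip, hbeq]
        rw [h2, h3, h1]

theorem pvWB_lstrip (m : List Char) : pvWB [] (pvLstrip m) = pvWB [] m := by
  induction m with
  | nil => rfl
  | cons c r ih =>
    by_cases hc : c = '_'
    · subst hc
      have : pvLstrip ('_' :: r) = pvLstrip r := by simp [pvLstrip, List.dropWhile]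
      rw [this, ih]
      simp [pvWB]
    · have hbeq : (c == '_') = false := by simpa using hc
      have : pvLstrip (c :: r) = c :: r := by simp [pvLstrip, hbeq]
      rw [this]

theorem pvHead_dropWhile (p : Char → Bool) (l : List Char) (c : Char)
    (h : (l.dropWhile p).head? = some c) : p c = false := by
  induction l with
  | nil => simp [List.dropWhile] at h
  | cons a t ih =>
    rw [List.dropWhile_cons] at h
    split_ifs at h with hp
    · exact ih h
    · simp only [List.head?_cons, Option.some.injEq] at h
      subst h
      simpa using hp

theorem pvStripU_collapse (m : List Char) :
    pvRstrip (pvLstrip (pvCollapse m)) = pvJoinW (pvWB [] m) := by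
  rw [pvLstrip_collapse, pvRstrip_collapse]
  have hws : pvWB [] (pvLstrip m) = pvWB [] m := pvWB_lstrip m
  unfold pvTw
  rw [hws]
  split_ifs with h1 h2
  · rw [h1]; rfl
  · exfalso
    have := pvHead_dropWhile (fun c => c == '_') m '_' h2
    simp at this
  · rfl

theorem pvStripChars_eq (l : List Char) :
    PySem.Chars.stripChars l ['_'] = pvRstrip (pvLstrip l) := by
  have hp : (fun c => List.contains ['_'] c) = (fun c : Char => c == '_') :=
    funext fun c => by by_cases h : c = '_' <;> simp [List.contains_eq_mem, h]
  unfold PySem.Chars.stripChars pvRstrip pvLstrip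
  rw [hp]

theorem pvFoldl_step (l : List Char) (ws : List (List Char)) (buf : List Char) :
    (let a := l.foldl pvStep (ws, buf); if a.2 = [] then a.1 else a.1 ++ [a.2]) =
      ws ++ pvWB2 buf l := by
  induction l generalizing ws buf with
  | nil =>
    show (if buf = [] then ws else ws ++ [buf]) = ws ++ pvWB2 buf []
    by_cases hb : buf = [] <;> simp [pvWB2, hb]
  | cons c r ih =>
    show (let a := r.foldl pvStep (pvStep (ws, buf) c); if a.2 = [] then a.1 else a.1 ++ [a.2]) =
      ws ++ pvWB2 buf (c :: r)
    by_cases ha : PySem.Chars.isalnum c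
    · rw [show pvStep (ws, buf) c = (ws, buf ++ [PySem.Chars.lowerChar c]) from by
        simp [pvStep, ha]]
      rw [ih]
      simp [pvWB2, ha]
    · by_cases hb : buf = []
      · subst hb
        rw [show pvStep (ws, []) c = (ws, []) from by simp [pvStep, ha]]
        rw [ih]
        simp [pvWB2, ha]
      · rw [show pvStep (ws, buf) c = (ws ++ [buf], []) from by simp [pvStep, ha, hb]]
        rw [ih]
        simp [pvWB2, ha, hb]

theorem pvWB2_eq_WB (l : List Char) (buf : List Char) : pvWB2 buf l = pvWB buf (l.map pvF) := by
  induction l generalizing buf with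
  | nil => rfl
  | cons c r ih =>
    by_cases ha : PySem.Chars.isalnum c
    · have hf : pvF c = PySem.Chars.lowerChar c := if_pos ha
      have hne : PySem.Chars.lowerChar c ≠ '_' := pvLower_ne_underscore c ha
      simp [pvWB2, pvWB, ha, hf, hne, ih]
    · have hf : pvF c = '_' := if_neg ha
      simp [pvWB2, pvWB, ha, hf, ih]

theorem pvJoin_eq_joinW (ws : List (List Char)) : PySem.Chars.join ['_'] ws = pvJoinW ws := by
  match ws with
  | [] => rfl
  | [w] => simp [PySem.Chars.join_singleton, pvJoinW]
  | w1 :: w2 :: rest =>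
    rw [PySem.Chars.join_cons_cons, pvJoin_eq_joinW (w2 :: rest)]
    simp [pvJoinW]

theorem pvCore (l : List Char) :
    PySem.Chars.stripChars (pvAloop (l.map pvF)) ['_'] =
      PySem.Chars.join ['_']
        (let a := l.foldl pvStep (([] : List (List Char)), ([] : List Char));
         if a.2 = [] then a.1 else a.1 ++ [a.2]) := by
  rw [pvStripChars_eq, pvAloop_eq_collapse, pvStripU_collapse, pvFoldl_step, pvJoin_eq_joinW,
    pvWB2_eq_WB]
  simp

-- ===== VERDICT (by name: the statement is the Claim_ definition above) =====
theorem build_stable_id_spec : Claim_equal_build_stable_id := by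
  intro ci _
  unfold Spec_build_stable_id build_stable_id build_stable_id_alt
  exact congrArg String.mk (pvCore _)
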